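-- pv_equiv track=rewrite | github.com/shahhi/RaichuChessGame | code.py | moveNorthEast
-- ===== SOURCE A (Python) =====
-- from copy import deepcopy
--
-- def moveNorthEast( player, board2d, row, col):
--     moves = []
--     kill_moves = []
--     N = len(board2d)
--     if player == 'w':
--         playerPieces = 'wW@'
--         opponentpieces = 'bB$'
--     else:
--         playerPieces = 'bB$'
--         opponentpieces = 'wW@'
--     move = deepcopy(board2d)
--     # Move till position above is empty
--     while row >= 1 and col <= N-2 and move[row - 1][col + 1] == '.':
--         # move the piece if place is empty
--         move[row - 1][col + 1] = move[row][col]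
--         move[row][col] = '.'
--         col += 1
--         row -= 1
--         moves.append(deepcopy(move))
--     # If there is opponent piece ahead, then we jump over it
--     if row >= 2 and col < N-2 and move[row - 1][col + 1] in opponentpieces and move[row - 2][col + 2] == '.':
--         # check if we can kill the piece
--         move[row - 2][col + 2] = move[row][col]
--         move[row][col] = '.'
--         move[row - 1][col + 1] = '.'
--         col += 2
--         row -= 2
--         kill_moves.append(deepcopy(move))
--         # Once killed we can only move till there are blank positions
--         while row >= 1 and col <= N-2 and move[row - 1][col + 1] == '.':
--             move[row - 1][col + 1] = move[row][col]
--             move[row][col] = '.'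
--             col += 1
--             row -= 1
--             kill_moves.append(deepcopy(move))
--     return (moves, kill_moves)
-- ===== SOURCE B (Python) =====
-- def moveNorthEast(player, board2d, row, col):
--     # Different decomposition: pass 1 walks the NE diagonal in coordinate space only,
--     # recording move/kill landing positions; pass 2 builds each output board as an
--     # independent snapshot of the original board (shallow row copies instead of deepcopy).
--     N = len(board2d)
--     opp = 'bB$' if player == 'w' else 'wW@'
--     path = []
--     r, c = row, col
--     while r >= 1 and c <= N - 2 and board2d[r - 1][c + 1] == '.':
--         path.append((r - 1, c + 1))
--         r, c = r - 1, c + 1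
--     kills = []
--     jumped = None
--     if r >= 2 and c < N - 2 and board2d[r - 1][c + 1] in opp and board2d[r - 2][c + 2] == '.':
--         jumped = (r - 1, c + 1)
--         kills.append((r - 2, c + 2))
--         r, c = r - 2, c + 2
--         while r >= 1 and c <= N - 2 and board2d[r - 1][c + 1] == '.':
--             kills.append((r - 1, c + 1))
--             r, c = r - 1, c + 1
--
--     def snap(pos, clear):
--         b = [list(rw) for rw in board2d]
--         piece = b[row][col]
--         b[row][col] = '.'
--         if clear is not None:
--             b[clear[0]][clear[1]] = '.'
--         b[pos[0]][pos[1]] = piece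
--         return b
--
--     return ([snap(p, None) for p in path], [snap(p, jumped) for p in kills])
-- ===== Notes on version B (the rewrite author's own statement) =====
-- stated objective: faster
-- what changed: B first walks the diagonal in coordinate space only, recording move/kill landing positions and the jumped cell, then builds every output board as an independent snapshot of the original board (shallow row copies plus three cell writes each), instead of A's single incrementally mutated deepcopy that is re-deepcopied at every step.
import Mathlib
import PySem

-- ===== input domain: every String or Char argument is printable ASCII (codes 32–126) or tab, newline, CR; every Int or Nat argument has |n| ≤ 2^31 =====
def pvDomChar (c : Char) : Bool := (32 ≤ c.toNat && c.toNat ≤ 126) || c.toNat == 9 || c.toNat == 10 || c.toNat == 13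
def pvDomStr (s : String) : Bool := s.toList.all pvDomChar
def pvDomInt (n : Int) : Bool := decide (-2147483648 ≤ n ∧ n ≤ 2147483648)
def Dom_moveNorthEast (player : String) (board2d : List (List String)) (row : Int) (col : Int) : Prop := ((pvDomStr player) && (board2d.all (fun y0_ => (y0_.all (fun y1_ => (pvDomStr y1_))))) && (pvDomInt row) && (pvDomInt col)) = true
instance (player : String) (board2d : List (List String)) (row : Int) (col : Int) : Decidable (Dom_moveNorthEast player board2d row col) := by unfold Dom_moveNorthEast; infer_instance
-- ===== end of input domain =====

-- B walks the diagonal in coordinate space first and then emits each board as an independent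
-- snapshot of the original (three cell writes on a shallow copy), instead of A's incrementally
-- mutated deepcopy, avoiding the per-step deepcopy (return value only; neither mutates its input).

-- ===== PORT A =====
-- b[i][j] read / write (total forms of Python indexing; Pre_ keeps every executed access in range)
def cellGet (b : List (List String)) (i j : Int) : String :=
  PySem.List.pyGetD (PySem.List.pyGetD b i []) j ""
def cellSet (b : List (List String)) (i j : Int) (v : String) : List (List String) :=
  PySem.List.pySetD b i (PySem.List.pySetD (PySem.List.pyGetD b i []) j v)

-- A's while loop: slide the piece one step NE on the mutated board, appending a snapshot per step
def mneLoopA (move : List (List String)) (N r c : Int) (acc : List (List (List String))) :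
    List (List String) × Int × Int × List (List (List String)) :=
  if h : 1 ≤ r ∧ c ≤ N - 2 ∧ cellGet move (r - 1) (c + 1) = "." then
    let m1 := cellSet move (r - 1) (c + 1) (cellGet move r c)
    let m2 := cellSet m1 r c "."
    mneLoopA m2 N (r - 1) (c + 1) (acc ++ [m2])
  else (move, r, c, acc)
  termination_by r.toNat
  decreasing_by obtain ⟨h1, -⟩ := h; omega

def moveNorthEast (player : String) (board2d : List (List String)) (row : Int) (col : Int) :
    List (List (List String)) × List (List (List String)) :=
  let N : Int := (board2d.length : Int)
  let opp : String := if player = "w" then "bB$" else "wW@"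
  let st := mneLoopA board2d N row col []
  let move := st.1
  let r := st.2.1
  let c := st.2.2.1
  let moves := st.2.2.2
  if 2 ≤ r ∧ c < N - 2 ∧ PySem.Str.isIn (cellGet move (r - 1) (c + 1)) opp = true ∧
      cellGet move (r - 2) (c + 2) = "." then
    let m1 := cellSet move (r - 2) (c + 2) (cellGet move r c)
    let m2 := cellSet m1 r c "."
    let m3 := cellSet m2 (r - 1) (c + 1) "."
    let st2 := mneLoopA m3 N (r - 2) (c + 2) [m3]
    (moves, st2.2.2.2)
  else (moves, [])

-- ===== PORT B =====
-- pass 1: walk the diagonal in coordinate space only, collecting positions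
def mneWalkB (b : List (List String)) (N r c : Int) : List (Int × Int) × Int × Int :=
  if h : 1 ≤ r ∧ c ≤ N - 2 ∧ cellGet b (r - 1) (c + 1) = "." then
    let rest := mneWalkB b N (r - 1) (c + 1)
    ((r - 1, c + 1) :: rest.1, rest.2)
  else ([], r, c)
  termination_by r.toNat
  decreasing_by obtain ⟨h1, -⟩ := h; omega

-- pass 2: one independent snapshot of the original board per recorded position
def snapB (b : List (List String)) (row col : Int) (clear : Option (Int × Int))
    (pos : Int × Int) : List (List String) :=
  let piece := cellGet b row col
  let b1 := cellSet b row col "."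
  let b2 := match clear with
    | none => b1
    | some q => cellSet b1 q.1 q.2 "."
  cellSet b2 pos.1 pos.2 piece

def moveNorthEast_alt (player : String) (board2d : List (List String)) (row : Int) (col : Int) :
    List (List (List String)) × List (List (List String)) :=
  let N : Int := (board2d.length : Int)
  let opp : String := if player = "w" then "bB$" else "wW@"
  let w := mneWalkB board2d N row col
  let r := w.2.1
  let c := w.2.2
  let kl : List (Int × Int) × Option (Int × Int) :=
    if 2 ≤ r ∧ c < N - 2 ∧ PySem.Str.isIn (cellGet board2d (r - 1) (c + 1)) opp = true ∧
        cellGet board2d (r - 2) (c + 2) = "." then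
      ((r - 2, c + 2) :: (mneWalkB board2d N (r - 2) (c + 2)).1, some (r - 1, c + 1))
    else ([], none)
  (w.1.map (snapB board2d row col none), kl.1.map (snapB board2d row col kl.2))

-- ===== PRECONDITION & SPEC =====
-- Pre_ admits every input that takes the trivial no-move path (row < 1 or col > N-2: A returns
-- ([], []) without touching the board) and otherwise requires a square N×N board entered at
-- 0 ≤ row < N, 0 ≤ col; excluded are ragged boards and wrapped/out-of-range start coordinates,
-- where Python indexing either raises IndexError mid-walk or silently wraps a negative index
-- (an artefact of A's implementation; where A still returns there, B returns the same value).
def Pre_moveNorthEast (player : String) (board2d : List (List String)) (row : Int) (col : Int) : Prop :=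
  (row < 1 ∨ (board2d.length : Int) - 2 < col) ∨
  (0 ≤ row ∧ row < (board2d.length : Int) ∧ 0 ≤ col ∧
    ∀ x ∈ board2d, (x.length : Int) = (board2d.length : Int))
instance (player : String) (board2d : List (List String)) (row : Int) (col : Int) : Decidable (Pre_moveNorthEast player board2d row col) := by unfold Pre_moveNorthEast; infer_instance

def pvWitness_moveNorthEast : String × List (List String) × Int × Int :=
  ("w", [[".", "."], ["w", "."]], 1, 0)

def Spec_moveNorthEast (player : String) (board2d : List (List String)) (row : Int) (col : Int) (out : List (List (List String)) × List (List (List String))) : Prop := out = moveNorthEast_alt player board2d row col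
instance (player : String) (board2d : List (List String)) (row : Int) (col : Int) (out : List (List (List String)) × List (List (List String))) : Decidable (Spec_moveNorthEast player board2d row col out) := by unfold Spec_moveNorthEast; infer_instance

-- ===== CLAIM (what is proved, stated in full; the proofs are below) =====
def Claim_equal_moveNorthEast : Prop := ∀ (player : String) (board2d : List (List String)) (row : Int) (col : Int), Dom_moveNorthEast player board2d row col → Pre_moveNorthEast player board2d row col → Spec_moveNorthEast player board2d row col (moveNorthEast player board2d row col)

-- ===== LEMMAS AND PROOFS =====

-- bridges to Nat-level list operations (all executed indices are nonnegative under Pre_)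
lemma cellGet_nn (b : List (List String)) (i j : Int) (hi : 0 ≤ i) (hj : 0 ≤ j) :
    cellGet b i j = (b.getD i.toNat []).getD j.toNat "" := by
  simp [cellGet, PySem.List.pyGetD, PySem.List.pyGet?_of_nonneg _ hi,
    PySem.List.pyGet?_of_nonneg _ hj, List.getD_eq_getElem?_getD]

lemma cellSet_nn (b : List (List String)) (i j : Int) (v : String) (hi : 0 ≤ i) (hj : 0 ≤ j) :
    cellSet b i j v = b.set i.toNat ((b.getD i.toNat []).set j.toNat v) := by
  simp [cellSet, PySem.List.pySetD_of_nonneg _ _ hi, PySem.List.pySetD_of_nonneg _ _ hj,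
    PySem.List.pyGetD, PySem.List.pyGet?_of_nonneg _ hi, List.getD_eq_getElem?_getD]

lemma length_cellSet (b : List (List String)) (i j : Int) (v : String) :
    (cellSet b i j v).length = b.length := by
  simp [cellSet, PySem.List.length_pySetD]

lemma sq_cellSet (b : List (List String)) (N i j : Int) (v : String)
    (hsq : ∀ x ∈ b, (x.length : Int) = N) (hi : 0 ≤ i) (hj : 0 ≤ j) :
    ∀ x ∈ cellSet b i j v, (x.length : Int) = N := by
  intro x hx
  rw [cellSet_nn b i j v hi hj] at hx
  by_cases hn : i.toNat < b.length
  · rcases List.mem_or_eq_of_mem_set hx with h | h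
    · exact hsq x h
    · subst h
      rw [List.length_set, List.getD_eq_getElem _ _ hn]
      exact hsq _ (List.getElem_mem hn)
  · rw [List.set_eq_of_length_le (by omega)] at hx
    exact hsq x hx

lemma get_set_ne (b : List (List String)) (i j i' j' : Int) (v : String)
    (hi : 0 ≤ i) (hj : 0 ≤ j) (hi' : 0 ≤ i') (hj' : 0 ≤ j') (hne : i ≠ i') :
    cellGet (cellSet b i j v) i' j' = cellGet b i' j' := by
  rw [cellGet_nn _ _ _ hi' hj', cellGet_nn _ _ _ hi' hj', cellSet_nn _ _ _ _ hi hj]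
  have h : i.toNat ≠ i'.toNat := by omega
  simp [List.getD_eq_getElem?_getD, List.getElem?_set_ne h]

lemma get_set_self (b : List (List String)) (N i j : Int) (v : String)
    (hN : N = (b.length : Int)) (hsq : ∀ x ∈ b, (x.length : Int) = N)
    (hi0 : 0 ≤ i) (hiN : i < N) (hj0 : 0 ≤ j) (hjN : j < N) :
    cellGet (cellSet b i j v) i j = v := by
  rw [cellSet_nn _ _ _ _ hi0 hj0, cellGet_nn _ _ _ hi0 hj0]
  have hn : i.toNat < b.length := by omega
  have hrow : ((b.getD i.toNat []).length : Int) = N := by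
    rw [List.getD_eq_getElem _ _ hn]
    exact hsq _ (List.getElem_mem hn)
  have hm : j.toNat < (b.getD i.toNat []).length := by omega
  rw [List.getD_eq_getElem?_getD (l := b.set i.toNat _), List.getElem?_set_self hn,
    Option.getD_some, List.getD_eq_getElem?_getD, List.getElem?_set_self hm, Option.getD_some]

lemma set_set_same (b : List (List String)) (i j : Int) (v w : String)
    (hi : 0 ≤ i) (hj : 0 ≤ j) :
    cellSet (cellSet b i j v) i j w = cellSet b i j w := by
  rw [cellSet_nn _ _ _ _ hi hj, cellSet_nn _ _ _ _ hi hj, cellSet_nn _ _ _ _ hi hj]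
  by_cases hn : i.toNat < b.length
  · rw [List.getD_eq_getElem?_getD (l := b.set i.toNat _), List.getElem?_set_self hn,
      Option.getD_some, List.set_set, List.set_set]
  · have e : ∀ x : List String, b.set i.toNat x = b := fun x => List.set_eq_of_length_le (by omega)
    simp [e]

lemma set_comm (b : List (List String)) (i j i' j' : Int) (v w : String)
    (hi : 0 ≤ i) (hj : 0 ≤ j) (hi' : 0 ≤ i') (hj' : 0 ≤ j') (hne : i ≠ i') :
    cellSet (cellSet b i j v) i' j' w = cellSet (cellSet b i' j' w) i j v := by
  rw [cellSet_nn _ _ _ _ hi hj, cellSet_nn _ _ _ _ hi' hj',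
    cellSet_nn _ _ _ _ hi' hj', cellSet_nn _ _ _ _ hi hj]
  have h : i.toNat ≠ i'.toNat := by omega
  rw [List.getD_eq_getElem?_getD (l := b.set i.toNat _), List.getElem?_set_ne h,
    List.getD_eq_getElem?_getD (l := b.set i'.toNat _), List.getElem?_set_ne (Ne.symm h),
    ← List.getD_eq_getElem?_getD, ← List.getD_eq_getElem?_getD, List.set_comm _ _ h]

lemma set_id (b : List (List String)) (N i j : Int) (v : String)
    (hN : N = (b.length : Int)) (hsq : ∀ x ∈ b, (x.length : Int) = N)
    (hi0 : 0 ≤ i) (hiN : i < N) (hj0 : 0 ≤ j) (hjN : j < N)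
    (hv : cellGet b i j = v) :
    cellSet b i j v = b := by
  rw [cellGet_nn _ _ _ hi0 hj0] at hv
  rw [cellSet_nn _ _ _ _ hi0 hj0]
  have hn : i.toNat < b.length := by omega
  have hrow : ((b.getD i.toNat []).length : Int) = N := by
    rw [List.getD_eq_getElem _ _ hn]
    exact hsq _ (List.getElem_mem hn)
  have hm : j.toNat < (b.getD i.toNat []).length := by omega
  rw [List.getD_eq_getElem _ _ hm] at hv
  rw [← hv, List.set_getElem_self hm, List.getD_eq_getElem _ _ hn,
    List.set_getElem_self hn]

-- loop invariant: A's mutated board at position (r, c) is b stamped the way B's snapshots are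
def StInv (b : List (List String)) (r0 c0 : Int) (cl : Option (Int × Int)) (r c : Int)
    (move : List (List String)) : Prop :=
  (r = r0 ∧ c = c0 ∧ cl = none ∧ move = b) ∨
  (r < r0 ∧ cellGet b r c = "." ∧ move = snapB b r0 c0 cl (r, c))

def ClOK (cl : Option (Int × Int)) (r r0 : Int) : Prop :=
  cl = none ∨ ∃ q : Int × Int, cl = some q ∧ r < q.1 ∧ q.1 < r0 ∧ 0 ≤ q.2

-- untouched rows (strictly above the piece) read the original board
lemma reads_orig (b : List (List String)) (r0 c0 : Int) (cl : Option (Int × Int)) (r c : Int)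
    (move : List (List String)) (hr00 : 0 ≤ r0) (hc00 : 0 ≤ c0) (hc : 0 ≤ c)
    (hcl : ClOK cl r r0) (hinv : StInv b r0 c0 cl r c move)
    (i j : Int) (hi0 : 0 ≤ i) (hir : i < r) (hj0 : 0 ≤ j) :
    cellGet move i j = cellGet b i j := by
  rcases hinv with ⟨-, -, -, h⟩ | ⟨hlt, -, h⟩
  · rw [h]
  · subst h
    simp only [snapB]
    rcases hcl with hcl | ⟨q, hcl, hq1, hq2, hq3⟩ <;> subst hcl
    · rw [get_set_ne _ _ _ _ _ _ (by omega) hc hi0 hj0 (by omega),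
        get_set_ne _ _ _ _ _ _ hr00 hc00 hi0 hj0 (by omega)]
    · rw [get_set_ne _ _ _ _ _ _ (by omega) hc hi0 hj0 (by omega),
        get_set_ne _ _ _ _ _ _ (by omega) hq3 hi0 hj0 (by omega),
        get_set_ne _ _ _ _ _ _ hr00 hc00 hi0 hj0 (by omega)]

-- the piece currently sits at (r, c) and is the original b[r0][c0]
lemma get_cur (b : List (List String)) (N r0 c0 : Int) (cl : Option (Int × Int)) (r c : Int)
    (move : List (List String)) (hN : N = (b.length : Int))
    (hsq : ∀ x ∈ b, (x.length : Int) = N)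
    (hr00 : 0 ≤ r0) (hr0N : r0 < N) (hc00 : 0 ≤ c0) (hr : r ≤ r0) (hr0 : 0 ≤ r)
    (hc : 0 ≤ c) (hcN : c < N) (hcl : ClOK cl r r0) (hinv : StInv b r0 c0 cl r c move) :
    cellGet move r c = cellGet b r0 c0 := by
  rcases hinv with ⟨hr1, hc1, -, h⟩ | ⟨hlt, -, h⟩
  · subst hr1; subst hc1; rw [h]
  · subst h
    simp only [snapB]
    rcases hcl with hcl | ⟨q, hcl, hq1, hq2, hq3⟩ <;> subst hcl
    · exact get_set_self _ N _ _ _ (by rw [length_cellSet]; exact hN)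
        (sq_cellSet _ N _ _ _ hsq hr00 hc00) hr0 (by omega) hc hcN
    · exact get_set_self _ N _ _ _ (by rw [length_cellSet, length_cellSet]; exact hN)
        (sq_cellSet _ N _ _ _ (sq_cellSet _ N _ _ _ hsq hr00 hc00) (by omega) hq3)
        hr0 (by omega) hc hcN

-- common algebra of one sliding step over a stamped board
lemma step_core (b2 : List (List String)) (N r c : Int) (p : String)
    (hN2 : N = (b2.length : Int)) (hsq2 : ∀ x ∈ b2, (x.length : Int) = N)
    (h1 : 1 ≤ r) (hrN : r < N) (hc : 0 ≤ c) (hcN : c < N)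
    (hdot2 : cellGet b2 r c = ".") :
    cellSet (cellSet (cellSet b2 r c p) (r - 1) (c + 1) p) r c "." =
      cellSet b2 (r - 1) (c + 1) p := by
  rw [set_comm b2 r c (r - 1) (c + 1) p p (by omega) hc (by omega) (by omega) (by omega)]
  rw [set_set_same _ r c p "." (by omega) hc]
  exact set_id _ N r c "." (by rw [length_cellSet]; exact hN2)
    (sq_cellSet _ N _ _ _ hsq2 (by omega) (by omega)) (by omega) hrN hc hcN
    (by rw [get_set_ne _ _ _ _ _ _ (by omega) (by omega) (by omega) hc (by omega)]; exact hdot2)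

-- common algebra of the jump block over a stamped board
lemma jump_core (b2 : List (List String)) (N r c : Int) (p : String)
    (hN2 : N = (b2.length : Int)) (hsq2 : ∀ x ∈ b2, (x.length : Int) = N)
    (h2 : 2 ≤ r) (hrN : r < N) (hc : 0 ≤ c) (hcN : c + 2 < N)
    (hdot2 : cellGet b2 r c = ".") :
    cellSet (cellSet (cellSet (cellSet b2 r c p) (r - 2) (c + 2) p) r c ".")
        (r - 1) (c + 1) "." =
      cellSet (cellSet b2 (r - 1) (c + 1) ".") (r - 2) (c + 2) p := by
  rw [set_comm b2 r c (r - 2) (c + 2) p p (by omega) hc (by omega) (by omega) (by omega)]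
  rw [set_set_same _ r c p "." (by omega) hc]
  rw [set_id _ N r c "." (by rw [length_cellSet]; exact hN2)
    (sq_cellSet _ N _ _ _ hsq2 (by omega) (by omega)) (by omega) hrN hc (by omega)
    (by rw [get_set_ne _ _ _ _ _ _ (by omega) (by omega) (by omega) hc (by omega)]; exact hdot2)]
  exact set_comm b2 (r - 2) (c + 2) (r - 1) (c + 1) p "." (by omega) (by omega) (by omega)
    (by omega) (by omega)

-- one loop step of A turns the stamped board at (r, c) into the stamped board at (r-1, c+1)
lemma step_move (b : List (List String)) (N r0 c0 : Int) (cl : Option (Int × Int)) (r c : Int)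
    (move : List (List String)) (hN : N = (b.length : Int))
    (hsq : ∀ x ∈ b, (x.length : Int) = N)
    (hr00 : 0 ≤ r0) (hr0N : r0 < N) (hc00 : 0 ≤ c0)
    (hr : r ≤ r0) (hd : c - c0 = r0 - r) (h1 : 1 ≤ r) (hcN : c ≤ N - 2)
    (hcl : ClOK cl r r0) (hinv : StInv b r0 c0 cl r c move) :
    cellSet (cellSet move (r - 1) (c + 1) (cellGet move r c)) r c "." =
      snapB b r0 c0 cl (r - 1, c + 1) := by
  have hcge : 0 ≤ c := by omega
  rw [get_cur b N r0 c0 cl r c move hN hsq hr00 hr0N hc00 hr (by omega) hcge (by omega)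
    hcl hinv]
  rcases hinv with ⟨hr1, hc1, hcleq, h⟩ | ⟨hlt, hdot, h⟩
  · rw [h, hr1, hc1, hcleq]
    simp only [snapB]
    exact set_comm b (r0 - 1) (c0 + 1) r0 c0 _ "." (by omega) (by omega) (by omega) (by omega)
      (by omega)
  · subst h
    rcases hcl with hcl | ⟨q, hcl, hq1, hq2, hq3⟩ <;> subst hcl <;> simp only [snapB]
    · exact step_core _ N r c _ (by rw [length_cellSet]; exact hN)
        (sq_cellSet _ N _ _ _ hsq hr00 hc00) h1 (by omega) hcge (by omega)
        (by rw [get_set_ne _ _ _ _ _ _ hr00 hc00 (by omega) hcge (by omega)]; exact hdot)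
    · exact step_core _ N r c _ (by rw [length_cellSet, length_cellSet]; exact hN)
        (sq_cellSet _ N _ _ _ (sq_cellSet _ N _ _ _ hsq hr00 hc00) (by omega) hq3)
        h1 (by omega) hcge (by omega)
        (by rw [get_set_ne _ _ _ _ _ _ (by omega) hq3 (by omega) hcge (by omega),
              get_set_ne _ _ _ _ _ _ hr00 hc00 (by omega) hcge (by omega)]; exact hdot)

-- the jump block of A builds exactly B's kill snapshot at the landing square
lemma jump_move (b : List (List String)) (N r0 c0 : Int) (r c : Int)
    (move : List (List String)) (hN : N = (b.length : Int))
    (hsq : ∀ x ∈ b, (x.length : Int) = N)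
    (hr00 : 0 ≤ r0) (hr0N : r0 < N) (hc00 : 0 ≤ c0)
    (hr : r ≤ r0) (hd : c - c0 = r0 - r) (h2 : 2 ≤ r) (hcN : c < N - 2)
    (hinv : StInv b r0 c0 none r c move) :
    cellSet (cellSet (cellSet move (r - 2) (c + 2) (cellGet move r c)) r c ".")
        (r - 1) (c + 1) "." =
      snapB b r0 c0 (some (r - 1, c + 1)) (r - 2, c + 2) := by
  have hcge : 0 ≤ c := by omega
  rw [get_cur b N r0 c0 none r c move hN hsq hr00 hr0N hc00 hr (by omega) hcge (by omega)
    (Or.inl rfl) hinv]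
  rcases hinv with ⟨hr1, hc1, -, h⟩ | ⟨hlt, hdot, h⟩
  · rw [h, hr1, hc1]
    simp only [snapB]
    rw [set_comm b (r0 - 2) (c0 + 2) r0 c0 _ "." (by omega) (by omega) (by omega) (by omega)
        (by omega),
      set_comm _ (r0 - 2) (c0 + 2) (r0 - 1) (c0 + 1) _ "." (by omega) (by omega) (by omega)
        (by omega) (by omega)]
  · subst h
    simp only [snapB]
    exact jump_core _ N r c _ (by rw [length_cellSet]; exact hN)
      (sq_cellSet _ N _ _ _ hsq hr00 hc00) h2 (by omega) hcge (by omega)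
      (by rw [get_set_ne _ _ _ _ _ _ hr00 hc00 (by omega) hcge (by omega)]; exact hdot)

lemma walk_bounds (b : List (List String)) (N : Int) :
    ∀ (fuel : Nat) (r c : Int), r.toNat ≤ fuel →
      (mneWalkB b N r c).2.1 ≤ r ∧ (mneWalkB b N r c).2.2 - c = r - (mneWalkB b N r c).2.1 := by
  intro fuel
  induction fuel with
  | zero =>
    intro r c hf
    rw [mneWalkB, dif_neg (by rintro ⟨h1, -⟩; omega)]
    exact ⟨le_rfl, by ring⟩
  | succ n ih =>
    intro r c hf
    by_cases hcond : 1 ≤ r ∧ c ≤ N - 2 ∧ cellGet b (r - 1) (c + 1) = "."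
    · rw [mneWalkB]
      simp only [dif_pos hcond]
      obtain ⟨h1, h2⟩ := ih (r - 1) (c + 1) (by omega)
      exact ⟨by omega, by omega⟩
    · rw [mneWalkB, dif_neg hcond]
      exact ⟨le_rfl, by ring⟩

-- the main simulation: A's loop = B's walk mapped through B's snapshot builder
lemma loop_walk (b : List (List String)) (N : Int) (hN : N = (b.length : Int))
    (hsq : ∀ x ∈ b, (x.length : Int) = N) (r0 c0 : Int)
    (hr00 : 0 ≤ r0) (hr0N : r0 < N) (hc00 : 0 ≤ c0) (cl : Option (Int × Int)) :
    ∀ (fuel : Nat) (r c : Int) (move : List (List String)) (acc : List (List (List String))),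
      r.toNat ≤ fuel → r ≤ r0 → c - c0 = r0 - r → ClOK cl r r0 → StInv b r0 c0 cl r c move →
      (mneLoopA move N r c acc).2.1 = (mneWalkB b N r c).2.1 ∧
      (mneLoopA move N r c acc).2.2.1 = (mneWalkB b N r c).2.2 ∧
      (mneLoopA move N r c acc).2.2.2 = acc ++ (mneWalkB b N r c).1.map (snapB b r0 c0 cl) ∧
      StInv b r0 c0 cl (mneWalkB b N r c).2.1 (mneWalkB b N r c).2.2 (mneLoopA move N r c acc).1 ∧
      ClOK cl (mneWalkB b N r c).2.1 r0 := by
  intro fuel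
  induction fuel with
  | zero =>
    intro r c move acc hf hr hd hcl hinv
    rw [mneLoopA, mneWalkB, dif_neg (by rintro ⟨h1, -⟩; omega),
      dif_neg (by rintro ⟨h1, -⟩; omega)]
    exact ⟨rfl, rfl, by simp, hinv, hcl⟩
  | succ n ih =>
    intro r c move acc hf hr hd hcl hinv
    by_cases hbase : 1 ≤ r ∧ c ≤ N - 2
    · have hread : cellGet move (r - 1) (c + 1) = cellGet b (r - 1) (c + 1) :=
        reads_orig b r0 c0 cl r c move hr00 hc00 (by omega) hcl hinv (r - 1) (c + 1)
          (by omega) (by omega) (by omega)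
      by_cases hdot : cellGet b (r - 1) (c + 1) = "."
      · have hcondA : 1 ≤ r ∧ c ≤ N - 2 ∧ cellGet move (r - 1) (c + 1) = "." :=
          ⟨hbase.1, hbase.2, by rw [hread]; exact hdot⟩
        have hcondB : 1 ≤ r ∧ c ≤ N - 2 ∧ cellGet b (r - 1) (c + 1) = "." :=
          ⟨hbase.1, hbase.2, hdot⟩
        have hm2 : cellSet (cellSet move (r - 1) (c + 1) (cellGet move r c)) r c "." =
            snapB b r0 c0 cl (r - 1, c + 1) :=
          step_move b N r0 c0 cl r c move hN hsq hr00 hr0N hc00 hr hd hbase.1 hbase.2 hcl hinv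
        have hcl' : ClOK cl (r - 1) r0 := by
          rcases hcl with h | ⟨q, hq, hq1, hq2, hq3⟩
          · exact Or.inl h
          · exact Or.inr ⟨q, hq, by omega, hq2, hq3⟩
        obtain ⟨e1, e2, e3, hi', hc'⟩ :=
          ih (r - 1) (c + 1)
            (cellSet (cellSet move (r - 1) (c + 1) (cellGet move r c)) r c ".")
            (acc ++ [cellSet (cellSet move (r - 1) (c + 1) (cellGet move r c)) r c "."])
            (by omega) (by omega) (by omega) hcl' (Or.inr ⟨by omega, hdot, hm2⟩)
        rw [mneLoopA, mneWalkB]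
        simp only [dif_pos hcondA, dif_pos hcondB]
        refine ⟨e1, e2, ?_, hi', hc'⟩
        rw [e3, hm2]
        simp [List.append_assoc]
      · rw [mneLoopA, mneWalkB,
          dif_neg (by rintro ⟨-, -, hx⟩; exact hdot (hread.symm.trans hx)),
          dif_neg (by rintro ⟨-, -, hx⟩; exact hdot hx)]
        exact ⟨rfl, rfl, by simp, hinv, hcl⟩
    · rw [mneLoopA, mneWalkB, dif_neg (fun h => hbase ⟨h.1, h.2.1⟩),
        dif_neg (fun h => hbase ⟨h.1, h.2.1⟩)]
      exact ⟨rfl, rfl, by simp, hinv, hcl⟩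

-- ===== VERDICT (by name: the statement is the Claim_ definition above) =====
theorem moveNorthEast_spec : Claim_equal_moveNorthEast := by
  intro player board2d row col hdom hpre
  unfold Spec_moveNorthEast
  rcases hpre with htriv | ⟨hr0, hrN, hc0, hsq⟩
  · -- trivial path: the piece cannot take a single step and no jump is possible
    have hA : mneLoopA board2d (board2d.length : Int) row col [] = (board2d, row, col, []) := by
      rw [mneLoopA, dif_neg (by rintro ⟨h1, h2, -⟩; omega)]
    have hB : mneWalkB board2d (board2d.length : Int) row col = ([], row, col) := by
      rw [mneWalkB, dif_neg (by rintro ⟨h1, h2, -⟩; omega)]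
    simp only [moveNorthEast, moveNorthEast_alt, hA, hB]
    rw [if_neg (by rintro ⟨h1, h2, -⟩; omega), if_neg (by rintro ⟨h1, h2, -⟩; omega)]
    simp
  · obtain ⟨e1, e2, e3, hinv, hcl⟩ :=
      loop_walk board2d (board2d.length : Int) rfl hsq row col hr0 hrN hc0 none
        row.toNat row col board2d [] le_rfl le_rfl (by omega) (Or.inl rfl)
        (Or.inl ⟨rfl, rfl, rfl, rfl⟩)
    obtain ⟨hw1, hw2⟩ := walk_bounds board2d (board2d.length : Int) row.toNat row col le_rfl
    simp only [moveNorthEast, moveNorthEast_alt]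
    set st := mneLoopA board2d (board2d.length : Int) row col [] with hst
    set w := mneWalkB board2d (board2d.length : Int) row col with hw
    rw [e1, e2, e3]
    have hcge : 0 ≤ w.2.2 := by omega
    by_cases hjb : 2 ≤ w.2.1 ∧ w.2.2 < (board2d.length : Int) - 2
    · have hread1 : cellGet st.1 (w.2.1 - 1) (w.2.2 + 1) =
          cellGet board2d (w.2.1 - 1) (w.2.2 + 1) :=
        reads_orig board2d row col none w.2.1 w.2.2 st.1 hr0 hc0 hcge hcl hinv _ _
          (by omega) (by omega) (by omega)
      have hread2 : cellGet st.1 (w.2.1 - 2) (w.2.2 + 2) =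
          cellGet board2d (w.2.1 - 2) (w.2.2 + 2) :=
        reads_orig board2d row col none w.2.1 w.2.2 st.1 hr0 hc0 hcge hcl hinv _ _
          (by omega) (by omega) (by omega)
      by_cases hop : PySem.Str.isIn (cellGet board2d (w.2.1 - 1) (w.2.2 + 1))
            (if player = "w" then "bB$" else "wW@") = true ∧
          cellGet board2d (w.2.1 - 2) (w.2.2 + 2) = "."
      · rw [if_pos ⟨hjb.1, hjb.2, by rw [hread1]; exact hop.1, by rw [hread2]; exact hop.2⟩,
          if_pos ⟨hjb.1, hjb.2, hop.1, hop.2⟩]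
        have hm3 :=
          jump_move board2d (board2d.length : Int) row col w.2.1 w.2.2 st.1 rfl hsq hr0 hrN
            hc0 hw1 (by omega) hjb.1 hjb.2 hinv
        obtain ⟨f1, f2, f3, -, -⟩ :=
          loop_walk board2d (board2d.length : Int) rfl hsq row col hr0 hrN hc0
            (some (w.2.1 - 1, w.2.2 + 1)) (w.2.1 - 2).toNat (w.2.1 - 2) (w.2.2 + 2)
            (cellSet (cellSet (cellSet st.1 (w.2.1 - 2) (w.2.2 + 2)
              (cellGet st.1 w.2.1 w.2.2)) w.2.1 w.2.2 ".") (w.2.1 - 1) (w.2.2 + 1) ".")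
            [cellSet (cellSet (cellSet st.1 (w.2.1 - 2) (w.2.2 + 2)
              (cellGet st.1 w.2.1 w.2.2)) w.2.1 w.2.2 ".") (w.2.1 - 1) (w.2.2 + 1) "."]
            le_rfl (by omega) (by omega)
            (Or.inr ⟨(w.2.1 - 1, w.2.2 + 1), rfl, by omega, by omega, by omega⟩)
            (Or.inr ⟨by omega, hop.2, hm3⟩)
        rw [f3, hm3]
        simp
      · rw [if_neg (by rintro ⟨-, -, hx3, hx4⟩; exact hop ⟨hread1 ▸ hx3, hread2 ▸ hx4⟩),
          if_neg (by rintro ⟨-, -, hx3, hx4⟩; exact hop ⟨hx3, hx4⟩)]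
        simp
    · rw [if_neg (fun hx => hjb ⟨hx.1, hx.2.1⟩), if_neg (fun hx => hjb ⟨hx.1, hx.2.1⟩)]
      simp
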